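-- pv_equiv track=rewrite | github.com/delattre1/CodingInterviews | craking_the_coding_interview/flip_bit_to_win/solution.py | get_alternating_sequences
-- ===== SOURCE A (Python) =====
-- BITS = 32  # Assuming 32-bits
--
-- def get_alternating_sequences(n):
--     '''
--     Return a list of the sizes of the sequences. The sequence starts off with the
--     number of 0s (which might be 0) and then alternates with the counts of each
--     value.
--     '''
--     sequences = []
--     searching_for = 0
--     counter = 0
--
--     for i in range(BITS):
--         if n & 1 != searching_for:
--             sequences.append(counter)
--             searching_for = n & 1  # Flip 1 to 0 or 0 to 1
--             # Alternatively: searching_for ^= 1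
--             counter = 0
--         counter += 1
--         n >>= 1
--     sequences.append(counter)
--
--     return sequences
-- ===== SOURCE B (Python) =====
-- BITS = 32  # Assuming 32-bits
--
--
-- def _runs(bits):
--     # Length of each maximal block of equal consecutive values, recursively.
--     if not bits:
--         return []
--     k = 1
--     while k < len(bits) and bits[k] == bits[0]:
--         k += 1
--     return [k] + _runs(bits[k:])
--
--
-- def get_alternating_sequences(n):
--     '''
--     Return a list of the sizes of the sequences. The sequence starts off with the
--     number of 0s (which might be 0) and then alternates with the counts of each
--     value.
--     '''
--     bits = [(n >> i) & 1 for i in range(BITS)]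
--     lens = _runs(bits)
--     return lens if bits[0] == 0 else [0] + lens
-- ===== Notes on version B (the rewrite author's own statement) =====
-- stated objective: alternative
-- what changed: A counts runs with a stateful counter while shifting n inside a single fixed-length loop; B first materializes the fixed-width bit list, then recursively groups it into maximal runs of equal bits (scan-and-split), prepending an empty zero-run when the lowest bit is set, keeping the zeros-first convention.
import Mathlib
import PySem

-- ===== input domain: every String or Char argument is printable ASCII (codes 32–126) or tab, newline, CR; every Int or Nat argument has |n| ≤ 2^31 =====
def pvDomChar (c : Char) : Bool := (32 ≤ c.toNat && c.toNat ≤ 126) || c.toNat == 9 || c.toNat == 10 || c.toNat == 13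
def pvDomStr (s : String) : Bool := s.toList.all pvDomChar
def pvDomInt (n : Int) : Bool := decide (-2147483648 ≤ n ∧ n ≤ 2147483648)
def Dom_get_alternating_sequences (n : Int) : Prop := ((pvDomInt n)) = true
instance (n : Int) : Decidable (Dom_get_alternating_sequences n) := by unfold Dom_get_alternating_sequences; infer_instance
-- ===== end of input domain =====

-- B replaces A's stateful counter loop over the shifted integer by an explicit bit list,
-- recursive grouping into run lengths, and an empty leading zero-run when the low bit is set (objective: alternative).

-- ===== PORT A =====
-- the loop body of A's for-loop (state: sequences, searching_for, counter, n); named for the proofs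
def stepA (st : List Int × Int × Int × Int) (_i : Int) : List Int × Int × Int × Int :=
  let sequences := st.1
  let searching_for := st.2.1
  let counter := st.2.2.1
  let m := st.2.2.2
  let (sequences, searching_for, counter) :=
    if PySem.Int.band m 1 ≠ searching_for then
      (sequences ++ [counter], PySem.Int.band m 1, 0)
    else (sequences, searching_for, counter)
  (sequences, searching_for, counter + 1, m >>> (1:Nat))

def get_alternating_sequences (n : Int) : List Int :=
  let st := (PySem.List.pyRange 0 32 1).foldl stepA ([], 0, 0, n)
  st.1 ++ [st.2.2.1]

-- ===== PORT B =====
-- the while loop of _runs counting the leading elements of the tail equal to bits[0]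
def leadB (b : Int) : List Int → Nat
  | [] => 0
  | y :: ys => if y = b then leadB b ys + 1 else 0

def runsB : List Int → List Int
  | [] => []
  | x :: xs =>
    ((leadB x xs + 1 : Nat) : Int) :: runsB (xs.drop (leadB x xs))
termination_by xs => xs.length
decreasing_by simp [List.length_drop]

def get_alternating_sequences_alt (n : Int) : List Int :=
  let bits := (PySem.List.pyRange 0 32 1).map (fun i => PySem.Int.band (n >>> i.toNat) 1)
  let lens := runsB bits
  if PySem.List.pyGetD bits 0 0 == 0 then lens else 0 :: lens

-- ===== PRECONDITION & SPEC =====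
def Spec_get_alternating_sequences (n : Int) (out : List Int) : Prop := out = get_alternating_sequences_alt n
instance (n : Int) (out : List Int) : Decidable (Spec_get_alternating_sequences n out) := by unfold Spec_get_alternating_sequences; infer_instance

-- ===== CLAIM (what is proved, stated in full; the proofs are below) =====
def Claim_equal_get_alternating_sequences : Prop := ∀ (n : Int), Dom_get_alternating_sequences n → Spec_get_alternating_sequences n (get_alternating_sequences n)

-- ===== LEMMAS AND PROOFS =====

-- the list of the low k bits of m, low bit first
def bitsL (m : Int) : Nat → List Int
  | 0 => []
  | k + 1 => PySem.Int.band m 1 :: bitsL (m >>> (1:Nat)) k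

-- k iterations of A's loop body
def iterA : Nat → (List Int × Int × Int × Int) → (List Int × Int × Int × Int)
  | 0, st => st
  | k + 1, st => iterA k (stepA st 0)

-- run-length continuation: extend the current run (value sf, count c) through the bit list
def rleC (sf c : Int) : List Int → List Int
  | [] => [c]
  | x :: xs => if x ≠ sf then c :: rleC x 1 xs else rleC sf (c + 1) xs

theorem foldl_stepA_eq_iterA (l : List Int) (st : List Int × Int × Int × Int) :
    l.foldl stepA st = iterA l.length st := by
  induction l generalizing st with
  | nil => rfl
  | cons x xs ih =>
    simp only [List.foldl, List.length_cons, iterA]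
    rw [ih]
    congr 1

theorem stepA_eq (seqs : List Int) (sf c m i : Int) :
    stepA (seqs, sf, c, m) i =
      if PySem.Int.band m 1 = sf then (seqs, sf, c + 1, m >>> (1:Nat))
      else (seqs ++ [c], PySem.Int.band m 1, 1, m >>> (1:Nat)) := by
  by_cases h : PySem.Int.band m 1 = sf
  · simp [stepA, h]
  · simp [stepA, h]

theorem iterA_rleC (k : Nat) : ∀ (seqs : List Int) (sf c m : Int),
    (iterA k (seqs, sf, c, m)).1 ++ [(iterA k (seqs, sf, c, m)).2.2.1]
      = seqs ++ rleC sf c (bitsL m k) := by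
  induction k with
  | zero => intro seqs sf c m; simp [iterA, bitsL, rleC]
  | succ k ih =>
    intro seqs sf c m
    simp only [iterA, stepA_eq, bitsL, rleC]
    by_cases h : PySem.Int.band m 1 = sf
    · rw [if_pos h, if_neg (by simp [h]), ih]
    · rw [if_neg h, if_pos h, ih, List.append_assoc]
      rfl

theorem shr_succ (n : Int) (a : Nat) : n >>> (a + 1) = (n >>> a) >>> (1:Nat) := by
  simp only [Int.shiftRight_eq_div_pow, pow_succ]
  push_cast
  rw [Int.ediv_ediv_of_nonneg (by positivity)]

theorem map_pyRange_bitsL (n : Int) (k : Nat) : ∀ a : Nat,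
    (PySem.List.pyRange (a : Int) ((a : Int) + k) 1).map
        (fun i => PySem.Int.band (n >>> i.toNat) 1)
      = bitsL (n >>> a) k := by
  induction k with
  | zero => intro a; simp [PySem.List.pyRange, bitsL]
  | succ k ih =>
    intro a
    rw [PySem.List.pyRange_one_cons (by omega)]
    simp only [List.map_cons, bitsL]
    congr 1
    · simp [Int.shiftRight_natCast_right]
    · have h2 : (a : Int) + ((k : Nat) + 1 : Nat) = ((a + 1 : Nat) : Int) + (k : Nat) := by
        push_cast; ring
      have h1 : (a : Int) + 1 = ((a + 1 : Nat) : Int) := by push_cast; ring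
      rw [h1, h2, ih (a + 1), shr_succ]

theorem rleC_runsB : ∀ (xs : List Int) (x c : Int),
    rleC x c xs = (c + (leadB x xs : Int)) :: runsB (xs.drop (leadB x xs)) := by
  intro xs
  induction xs with
  | nil =>
    intro x c
    simp [rleC, leadB, runsB.eq_1]
  | cons y ys ih =>
    intro x c
    by_cases h : y = x
    · subst h
      simp only [rleC, leadB, if_neg (not_not_intro rfl)]
      rw [ih]
      congr 1
      push_cast
      ring
    · simp only [rleC, leadB, if_pos h, if_neg h, List.drop_zero, Nat.cast_zero, add_zero]
      rw [ih, runsB.eq_2]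
      congr 2
      push_cast
      ring

theorem runsB_cons_rleC (x : Int) (xs : List Int) : runsB (x :: xs) = rleC x 1 xs := by
  rw [runsB.eq_2, rleC_runsB]
  congr 1
  push_cast
  ring

-- ===== VERDICT (by name: the statement is the Claim_ definition above) =====
theorem get_alternating_sequences_spec : Claim_equal_get_alternating_sequences := by
  intro n _
  unfold Spec_get_alternating_sequences get_alternating_sequences get_alternating_sequences_alt
  rw [foldl_stepA_eq_iterA]
  have hbits : (PySem.List.pyRange 0 32 1).map (fun i => PySem.Int.band (n >>> i.toNat) 1)
      = bitsL n 32 := by simpa using map_pyRange_bitsL n 32 0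
  have hlen : (PySem.List.pyRange 0 32 1).length = 32 := by decide
  rw [hlen, hbits]
  have hA : (iterA 32 ([], 0, 0, n)).1 ++ [(iterA 32 ([], 0, 0, n)).2.2.1]
      = rleC 0 0 (bitsL n 32) := by simpa using iterA_rleC 32 [] 0 0 n
  rw [hA]
  have h32 : bitsL n 32 = PySem.Int.band n 1 :: bitsL (n >>> (1:Nat)) 31 := rfl
  rw [h32]
  have hruns : runsB (PySem.Int.band n 1 :: bitsL (n >>> (1:Nat)) 31)
      = rleC (PySem.Int.band n 1) 1 (bitsL (n >>> (1:Nat)) 31) := runsB_cons_rleC _ _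
  by_cases h : PySem.Int.band n 1 = 0
  · rw [if_pos (by simp [PySem.List.pyGetD_zero_cons, h]), hruns, h]
    simp only [rleC, if_neg (not_not_intro rfl)]
    norm_num
  · rw [if_neg (by simp [PySem.List.pyGetD_zero_cons, h]), hruns]
    simp only [rleC, if_pos h]
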